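-- pv_equiv track=rewrite | github.com/duncanwraight/dotfiles | snippets/volumes.py | get_useful_tag
-- ===== SOURCE A (Python) =====
-- def get_useful_tag(tags):
--   name = ""
--   keys_to_search = ["Name", "aws:autoscaling:groupName", "aws:cloudformation:stack-name"]
--
--   for key in keys_to_search:
--     for tag in tags:
--       if tag["Key"] == key:
--         name = tag["Value"]
--
--     if name:
--       break
--
--   if not name:
--     name = "Unknown"
--
--   return name
-- ===== SOURCE B (Python) =====
-- def get_useful_tag(tags):
--   priority = ("Name", "aws:autoscaling:groupName", "aws:cloudformation:stack-name")
--   last = {}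
--   for tag in tags:
--     k = tag["Key"]
--     if k in priority:
--       last[k] = tag
--   for key in priority:
--     if key in last:
--       value = last[key]["Value"]
--       if value:
--         return value
--   return "Unknown"
-- ===== Notes on version B (the rewrite author's own statement) =====
-- stated objective: idiomatic
-- what changed: B replaces A's three full scans of tags (one per priority key, with a break) by a single pass building a dict from each priority key to its last-seen tag, then walks the priority keys returning the first truthy Value.
import Mathlib
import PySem

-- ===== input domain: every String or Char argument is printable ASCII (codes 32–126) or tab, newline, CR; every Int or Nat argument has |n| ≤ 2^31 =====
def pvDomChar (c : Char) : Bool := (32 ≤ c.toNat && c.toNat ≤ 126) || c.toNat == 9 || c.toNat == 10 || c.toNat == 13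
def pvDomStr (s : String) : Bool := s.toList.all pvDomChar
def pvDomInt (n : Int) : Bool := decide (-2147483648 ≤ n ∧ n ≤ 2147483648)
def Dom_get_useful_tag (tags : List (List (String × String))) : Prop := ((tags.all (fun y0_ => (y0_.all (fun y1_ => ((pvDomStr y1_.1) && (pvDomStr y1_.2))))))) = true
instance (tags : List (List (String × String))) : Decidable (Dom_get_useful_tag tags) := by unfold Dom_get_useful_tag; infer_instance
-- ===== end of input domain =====

-- B builds, in one pass, a dict from each priority key to its last-seen tag, then
-- walks the priority keys and returns the first truthy Value (A scans tags once per key).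


-- tag["Key"]: a Python dict arrives as an association list; lookup = first match (none = KeyError, excluded by Pre_)
def tagGet? (tag : List (String × String)) (k : String) : Option String :=
  (tag.find? (fun p => p.1 == k)).map (·.2)

-- ===== PORT A =====
-- inner 'for tag in tags: if tag["Key"] == key: name = tag["Value"]'
def pvInnerA (tags : List (List (String × String))) (key : String) (name : String) : String :=
  tags.foldl (fun n tag => if tagGet? tag "Key" = some key then (tagGet? tag "Value").getD "" else n) name

-- outer 'for key in keys_to_search: …; if name: break'
def pvOuterA (keys : List String) (tags : List (List (String × String))) (name : String) : String :=
  match keys with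
  | [] => name
  | key :: ks =>
    let name := pvInnerA tags key name
    if name ≠ "" then name else pvOuterA ks tags name

def get_useful_tag (tags : List (List (String × String))) : String :=
  let name := pvOuterA ["Name", "aws:autoscaling:groupName", "aws:cloudformation:stack-name"] tags ""
  if name = "" then "Unknown" else name

-- ===== PORT B =====
def pvPriority : List String := ["Name", "aws:autoscaling:groupName", "aws:cloudformation:stack-name"]

-- one pass: last[k] = tag for every priority-keyed tag (last wins)
def pvLastB (tags : List (List (String × String))) : PySem.Dict String (List (String × String)) :=
  tags.foldl (fun d tag =>
    match tagGet? tag "Key" with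
    | some k => if pvPriority.contains k then d.insert k tag else d
    | none => d) PySem.Dict.empty

-- 'for key in priority: if key in last: value = last[key]["Value"]; if value: return value'
def pvWalkB (keys : List String) (last : PySem.Dict String (List (String × String))) : String :=
  match keys with
  | [] => "Unknown"
  | key :: ks =>
    match last.get? key with
    | some tag =>
      let value := (tagGet? tag "Value").getD ""
      if value ≠ "" then value else pvWalkB ks last
    | none => pvWalkB ks last

def get_useful_tag_alt (tags : List (List (String × String))) : String :=
  pvWalkB pvPriority (pvLastB tags)

-- ===== PRECONDITION & SPEC =====
-- Pre_ excludes the inputs where Python A raises KeyError: a tag without "Key", or a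
-- priority-keyed tag without "Value".  (Slightly narrower than exact: A still returns when a
-- Value-less priority tag is only reached after the break or shadowed by a later match; on all
-- such excluded-but-returning inputs B returns the same value — see the claim's cites.)
def Pre_get_useful_tag (tags : List (List (String × String))) : Prop :=
  ∀ tag ∈ tags, (tagGet? tag "Key").isSome = true ∧
    ((tagGet? tag "Key").getD "" ∈ pvPriority → (tagGet? tag "Value").isSome = true)
instance (tags : List (List (String × String))) : Decidable (Pre_get_useful_tag tags) := by
  unfold Pre_get_useful_tag; infer_instance

def pvWitness_get_useful_tag : (List (List (String × String))) :=
  [[("Key", "Name"), ("Value", "web")], [("Key", "env"), ("Stage", "prod")]]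

def Spec_get_useful_tag (tags : List (List (String × String))) (out : String) : Prop := out = get_useful_tag_alt tags
instance (tags : List (List (String × String))) (out : String) : Decidable (Spec_get_useful_tag tags out) := by unfold Spec_get_useful_tag; infer_instance

-- ===== CLAIM (what is proved, stated in full; the proofs are below) =====
def Claim_equal_get_useful_tag : Prop := ∀ (tags : List (List (String × String))), Dom_get_useful_tag tags → Pre_get_useful_tag tags → Spec_get_useful_tag tags (get_useful_tag tags)

-- ===== LEMMAS AND PROOFS =====

-- the last tag of tags whose "Key" is k
def pvLastMatch (tags : List (List (String × String))) (k : String) : Option (List (String × String)) :=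
  tags.foldl (fun acc tag => if tagGet? tag "Key" = some k then some tag else acc) none

theorem pvLM_aux (tags : List (List (String × String))) (k : String)
    (acc : Option (List (String × String))) :
    tags.foldl (fun acc tag => if tagGet? tag "Key" = some k then some tag else acc) acc
      = match pvLastMatch tags k with
        | some t => some t
        | none => acc := by
  induction tags generalizing acc with
  | nil => simp [pvLastMatch]
  | cons t ts ih =>
    simp only [pvLastMatch, List.foldl_cons] at *
    by_cases h : tagGet? t "Key" = some k
    · rw [if_pos h, if_pos h, ih (some t)]
      cases hlm : ts.foldl (fun acc tag => if tagGet? tag "Key" = some k then some tag else acc)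
          (none : Option (List (String × String))) <;> simp
    · rw [if_neg h, if_neg h, ih acc]

theorem pvLastMatch_cons (t : List (String × String)) (ts : List (List (String × String)))
    (k : String) :
    pvLastMatch (t :: ts) k =
      if tagGet? t "Key" = some k then
        (match pvLastMatch ts k with | some u => some u | none => some t)
      else pvLastMatch ts k := by
  show List.foldl _ _ _ = _
  rw [List.foldl_cons]
  by_cases h : tagGet? t "Key" = some k
  · simp only [h, if_true]
    exact pvLM_aux ts k (some t)
  · simp only [h, if_false]
    rfl

theorem pvInnerA_eq (tags : List (List (String × String))) (key name : String) :
    pvInnerA tags key name =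
      match pvLastMatch tags key with
      | some t => (tagGet? t "Value").getD ""
      | none => name := by
  induction tags generalizing name with
  | nil => simp [pvInnerA, pvLastMatch]
  | cons t ts ih =>
    rw [pvLastMatch_cons]
    show pvInnerA ts key (if tagGet? t "Key" = some key then (tagGet? t "Value").getD "" else name) = _
    rw [ih]
    by_cases h : tagGet? t "Key" = some key <;>
      cases hlm : pvLastMatch ts key <;> simp [h]

theorem pvLastB_get? (tags : List (List (String × String))) (k : String)
    (hk : pvPriority.contains k = true) :
    (pvLastB tags).get? k = pvLastMatch tags k := by
  suffices h : ∀ d : PySem.Dict String (List (String × String)),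
      (tags.foldl (fun d tag =>
        match tagGet? tag "Key" with
        | some k' => if pvPriority.contains k' then d.insert k' tag else d
        | none => d) d).get? k
      = match pvLastMatch tags k with
        | some t => some t
        | none => d.get? k by
    have := h PySem.Dict.empty
    rw [pvLastB, this]
    cases hlm : pvLastMatch tags k <;> simp [PySem.Dict.get?_empty]
  induction tags with
  | nil => intro d; simp [pvLastMatch]
  | cons t ts ih =>
    intro d
    rw [List.foldl_cons, pvLastMatch_cons]
    cases hkey : tagGet? t "Key" with
    | none =>
      rw [if_neg (by simp : ¬ (none : Option String) = some k)]
      exact ih d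
    | some k' =>
      by_cases hkk : k' = k
      · subst hkk
        rw [if_pos rfl]
        have hstep : (match some k' with
            | some k'' => if pvPriority.contains k'' = true then d.insert k'' t else d
            | none => d) = d.insert k' t := by
          have hmem : k' ∈ pvPriority := by simpa using hk
          simp [hmem]
        rw [hstep, ih (d.insert k' t)]
        cases hlm : pvLastMatch ts k' <;>
          simp [PySem.Dict.get?_insert_self]
      · rw [if_neg (by simp [hkk] : ¬ some k' = some k)]
        cases hc : pvPriority.contains k'
        · have hstep : (match some k' with
              | some k'' => if pvPriority.contains k'' = true then d.insert k'' t else d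
              | none => d) = d := by
            have hnm : k' ∉ pvPriority := by simpa using hc
            simp [hnm]
          rw [hstep]
          exact ih d
        · have hstep : (match some k' with
              | some k'' => if pvPriority.contains k'' = true then d.insert k'' t else d
              | none => d) = d.insert k' t := by
            have hmem : k' ∈ pvPriority := by simpa using hc
            simp [hmem]
          rw [hstep, ih (d.insert k' t)]
          cases hlm : pvLastMatch ts k <;>
            simp [PySem.Dict.get?_insert, Ne.symm hkk]

-- ===== VERDICT (by name: the statement is the Claim_ definition above) =====
theorem get_useful_tag_spec : Claim_equal_get_useful_tag := by
  intro tags _ _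
  unfold Spec_get_useful_tag get_useful_tag get_useful_tag_alt
  simp only [pvPriority, pvWalkB, pvOuterA]
  rw [pvLastB_get? tags "Name" (by decide), pvLastB_get? tags "aws:autoscaling:groupName" (by decide),
      pvLastB_get? tags "aws:cloudformation:stack-name" (by decide)]
  rw [pvInnerA_eq, pvInnerA_eq, pvInnerA_eq]
  cases h1 : pvLastMatch tags "Name" <;>
  cases h2 : pvLastMatch tags "aws:autoscaling:groupName" <;>
  cases h3 : pvLastMatch tags "aws:cloudformation:stack-name" <;>
    simp <;> split_ifs <;> simp_all
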